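-- pv_equiv track=rewrite | github.com/IgorTihomirov/Data_engineer | Python/algorithms_data_structures/block_merge_sort.py | max_blocks
-- ===== SOURCE A (Python) =====
-- def max_blocks(arr):
--     n = len(arr)
--     max_blocks_count = 0
--     current_max = 0
--
--     for i in range(n):
--         current_max = max(current_max, arr[i])
--
--         # Если текущий индекс совпадает с текущим максимальным элементом,
--         # это означает, что мы можем завершить текущий блок.
--         if i == current_max:
--             max_blocks_count += 1
--
--     return max_blocks_count
-- ===== SOURCE B (Python) =====
-- def max_blocks(arr):
--     # Divide and conquer: solve(xs, s, m) counts blocks in the segment xs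
--     # starting at global index s with incoming running max m, and returns
--     # (count, outgoing running max). Combining halves threads the max through.
--     def solve(xs, s, m):
--         if not xs:
--             return (0, m)
--         if len(xs) == 1:
--             mm = max(m, xs[0])
--             return ((1 if s == mm else 0), mm)
--         mid = len(xs) // 2
--         c1, m1 = solve(xs[:mid], s, m)
--         c2, m2 = solve(xs[mid:], s + mid, m1)
--         return (c1 + c2, m2)
--     return solve(arr, 0, 0)[0]
-- ===== Notes on version B (the rewrite author's own statement) =====
-- stated objective: alternative
-- what changed: A's single fused linear loop is replaced by a divide-and-conquer recursion that splits the array in half and returns (block count, outgoing running max) per segment, threading the max between halves.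
import Mathlib
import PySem

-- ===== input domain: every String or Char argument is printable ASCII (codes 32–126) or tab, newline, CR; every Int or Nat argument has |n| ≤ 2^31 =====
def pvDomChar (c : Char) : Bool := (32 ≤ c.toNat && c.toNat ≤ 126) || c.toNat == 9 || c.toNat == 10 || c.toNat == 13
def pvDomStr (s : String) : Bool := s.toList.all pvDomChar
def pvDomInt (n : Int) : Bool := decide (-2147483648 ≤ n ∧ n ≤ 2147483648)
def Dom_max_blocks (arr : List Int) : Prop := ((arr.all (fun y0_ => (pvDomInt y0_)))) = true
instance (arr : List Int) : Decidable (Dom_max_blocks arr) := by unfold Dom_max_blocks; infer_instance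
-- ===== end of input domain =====

-- B replaces A's fused linear loop by a divide-and-conquer recursion returning (count, outgoing max) per half; same result, different decomposition.

-- ===== PORT A =====
-- single fused loop: state = (max_blocks_count, current_max), i over range(n), arr[i]
def max_blocks (arr : List Int) : Int :=
  let n : Int := arr.length
  (((PySem.List.pyRange 0 n 1).foldl
      (fun (st : Int × Int) i =>
        let cm := max st.2 (PySem.List.pyGetD arr i 0)
        (if i = cm then st.1 + 1 else st.1, cm))
      (0, 0)) : Int × Int).1

-- ===== PORT B =====
-- Source B's solve(xs, s, m): divide and conquer on the segment, threading the running max.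
-- The Nat fuel (seeded with the list length) only guards termination; it is never exhausted.
def solveB : Nat → List Int → Int → Int → Int × Int
  | _, [], _, m => (0, m)
  | _, [x], s, m => let mm := max m x; (if s = mm then 1 else 0, mm)
  | 0, _ :: _ :: _, _, m => (0, m)   -- unreachable: fuel ≥ length
  | fuel + 1, x :: y :: t, s, m =>
    let mid := (x :: y :: t).length / 2
    let p1 := solveB fuel ((x :: y :: t).take mid) s m
    let p2 := solveB fuel ((x :: y :: t).drop mid) (s + (mid : Int)) p1.2
    (p1.1 + p2.1, p2.2)

def max_blocks_alt (arr : List Int) : Int := (solveB arr.length arr 0 0).1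

-- ===== PRECONDITION & SPEC =====
def Spec_max_blocks (arr : List Int) (out : Int) : Prop := out = max_blocks_alt arr
instance (arr : List Int) (out : Int) : Decidable (Spec_max_blocks arr out) := by unfold Spec_max_blocks; infer_instance

-- ===== CLAIM (what is proved, stated in full; the proofs are below) =====
def Claim_equal_max_blocks : Prop := ∀ (arr : List Int), Dom_max_blocks arr → Spec_max_blocks arr (max_blocks arr)

-- ===== LEMMAS AND PROOFS =====

-- the fused step of A's loop, on (index, element) pairs
def stepA (st : Int × Int) (p : Int × Int) : Int × Int :=
  (if p.1 = max st.2 p.2 then st.1 + 1 else st.1, max st.2 p.2)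

-- shifting the count seed of A's fold
lemma foldl_stepA_shift (l : List (Int × Int)) : ∀ (c m : Int),
    (l.foldl stepA (c, m)) = (c + (l.foldl stepA (0, m)).1, (l.foldl stepA (0, m)).2) := by
  induction l with
  | nil => intro c m; simp
  | cons p t ih =>
      intro c m
      simp only [List.foldl_cons, stepA]
      rw [ih (if p.1 = max m p.2 then c + 1 else c), ih (if p.1 = max m p.2 then 0 + 1 else 0)]
      split_ifs <;> simp [Int.add_assoc]

-- B's divide-and-conquer equals A's fused fold over the enumerated segment (fuel ≥ length)
lemma solveB_eq_fold : ∀ (f : Nat) (xs : List Int), xs.length ≤ f → ∀ (s m : Int),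
    solveB f xs s m = (PySem.List.enumerate xs s).foldl stepA (0, m) := by
  intro f
  induction f with
  | zero =>
      intro xs hf s m
      match xs with
      | [] => simp [solveB, PySem.List.enumerate_nil]
      | x :: t => simp at hf
  | succ f ih =>
    intro xs hf s m
    match xs with
    | [] => simp [solveB, PySem.List.enumerate_nil]
    | [x] =>
        simp [solveB, PySem.List.enumerate_cons, PySem.List.enumerate_nil, stepA]
    | x :: y :: t =>
        rw [solveB]
        set xs := x :: y :: t with hxs
        set mid := xs.length / 2 with hmid
        have hmid1 : 1 ≤ mid := by simp only [hmid, hxs, List.length_cons]; omega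
        have hmidlt : mid < xs.length := by simp only [hmid, hxs, List.length_cons]; omega
        have hlen : xs.length ≤ f + 1 := hf
        have htake : (xs.take mid).length = mid := by
          simp [List.length_take]; omega
        have h1 := ih (xs.take mid) (by rw [htake]; omega) s m
        have h2 := ih (xs.drop mid) (by simp [List.length_drop]; omega)
                      (s + (mid : Int)) ((solveB f (xs.take mid) s m).2)
        rw [h1] at h2
        rw [h1, h2]
        have hsplit : PySem.List.enumerate xs s
            = PySem.List.enumerate (xs.take mid) s
              ++ PySem.List.enumerate (xs.drop mid) (s + (mid : Int)) := by
          conv_lhs => rw [← List.take_append_drop mid xs]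
          rw [PySem.List.enumerate_append, htake]
        rw [hsplit, List.foldl_append]
        conv_rhs =>
          rw [← Prod.mk.eta (p := List.foldl stepA (0, m) (PySem.List.enumerate (xs.take mid) s))]
          rw [foldl_stepA_shift]

-- ===== VERDICT (by name: the statement is the Claim_ definition above) =====
theorem max_blocks_spec : Claim_equal_max_blocks := by
  intro arr _
  unfold Spec_max_blocks max_blocks max_blocks_alt
  have h := PySem.List.enumerate_eq_map_pyRange (xs := arr) (d := 0)
  have hb := solveB_eq_fold arr.length arr le_rfl 0 0
  rw [hb, h, List.foldl_map]
  rfl
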